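-- pv_equiv track=rewrite | github.com/Andrewnetwork/MathematicalInvestigations | ComputerVision/AutomataSeedlings/V3/GraphFN.py | connectedSubWalks
-- ===== SOURCE A (Python) =====
-- def connectedSubWalks(walkIn,acnDict):
--     walk = list(walkIn)
--     walkLen = len(walk)
--     walkPos = 0
--
--     nodeQueue = []
--     subConnected = []
--
--     while walkPos + 1 < walkLen:
--         if not (walk[walkPos] in acnDict[walk[walkPos + 1]]):
--             nodeQueue.append(walk[walkPos])
--             subConnected.append(nodeQueue)
--             nodeQueue = []
--         else:
--             nodeQueue.append(walk[walkPos])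
--
--
--         walkPos += 1
--
--     return subConnected
-- ===== SOURCE B (Python) =====
-- def connectedSubWalks(walkIn, acnDict):
--     walk = list(walkIn)
--     breaks = [i for i in range(len(walk) - 1) if walk[i] not in acnDict[walk[i + 1]]]
--     groups = []
--     prev = 0
--     for b in breaks:
--         groups.append(walk[prev:b + 1])
--         prev = b + 1
--     return groups
-- ===== Notes on version B (the rewrite author's own statement) =====
-- stated objective: simpler
-- what changed: Replaces the accumulate-and-reset queue state machine with a find-break-positions-then-slice decomposition: first compute the break indices, then emit each group as a slice of the walk.
import Mathlib
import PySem

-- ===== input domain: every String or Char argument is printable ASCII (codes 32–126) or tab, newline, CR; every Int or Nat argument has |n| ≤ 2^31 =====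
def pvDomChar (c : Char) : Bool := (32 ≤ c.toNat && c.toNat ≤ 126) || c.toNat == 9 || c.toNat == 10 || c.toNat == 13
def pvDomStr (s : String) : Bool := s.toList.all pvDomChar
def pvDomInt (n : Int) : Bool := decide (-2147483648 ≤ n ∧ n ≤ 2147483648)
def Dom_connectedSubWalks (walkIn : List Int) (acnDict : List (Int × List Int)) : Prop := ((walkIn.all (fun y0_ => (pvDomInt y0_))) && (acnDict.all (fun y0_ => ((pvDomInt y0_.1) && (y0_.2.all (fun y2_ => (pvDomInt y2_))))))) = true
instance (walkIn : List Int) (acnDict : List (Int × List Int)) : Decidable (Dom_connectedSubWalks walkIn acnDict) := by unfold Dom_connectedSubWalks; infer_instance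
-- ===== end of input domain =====

-- B replaces A's accumulate-and-reset queue state machine by computing the break
-- positions first and then slicing the walk into groups (objective: simpler).

-- ===== PORT A =====
-- the while loop over walkPos (with walkPos+1 < walkLen) is the foldl over range (walkLen-1);
-- walk[pos] is in range there, getD 0 is never the default; a missing dict key (KeyError) is excluded by Pre_
def connectedSubWalks (walkIn : List Int) (acnDict : List (Int × List Int)) : List (List Int) :=
  let walk := walkIn
  let walkLen := walk.length
  let st := (List.range (walkLen - 1)).foldl
    (fun (st : List Int × List (List Int)) pos =>
      if !((PySem.Dict.mk acnDict).getD (walk.getD (pos + 1) 0) []).contains (walk.getD pos 0) then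
        ([], st.2 ++ [st.1 ++ [walk.getD pos 0]])
      else
        (st.1 ++ [walk.getD pos 0], st.2))
    (([] : List Int), ([] : List (List Int)))
  st.2

-- ===== PORT B =====
-- walk[prev:b+1] with 0 ≤ prev ≤ b+1 ≤ len is (walk.drop prev).take (b+1-prev), exact on that range
def connectedSubWalks_alt (walkIn : List Int) (acnDict : List (Int × List Int)) : List (List Int) :=
  let walk := walkIn
  let breaks := (List.range (walk.length - 1)).filter
    (fun i => !((PySem.Dict.mk acnDict).getD (walk.getD (i + 1) 0) []).contains (walk.getD i 0))
  let st := breaks.foldl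
    (fun (st : List (List Int) × Nat) b =>
      (st.1 ++ [(walk.drop st.2).take (b + 1 - st.2)], b + 1))
    (([] : List (List Int)), 0)
  st.1

-- ===== PRECONDITION & SPEC =====
-- Pre_ excludes exactly the inputs where Python A raises KeyError: some node of walk's tail
-- is not a key of acnDict (B raises there too).
def Pre_connectedSubWalks (walkIn : List Int) (acnDict : List (Int × List Int)) : Prop :=
  ∀ x ∈ walkIn.tail, ((PySem.Dict.mk acnDict).get? x).isSome
instance (walkIn : List Int) (acnDict : List (Int × List Int)) : Decidable (Pre_connectedSubWalks walkIn acnDict) := by unfold Pre_connectedSubWalks; infer_instance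

def pvWitness_connectedSubWalks : List Int × (List (Int × List Int)) :=
  ([1, 2, 3, 2], [(1, [2]), (2, [1, 3]), (3, [])])

def Spec_connectedSubWalks (walkIn : List Int) (acnDict : List (Int × List Int)) (out : List (List Int)) : Prop := out = connectedSubWalks_alt walkIn acnDict
instance (walkIn : List Int) (acnDict : List (Int × List Int)) (out : List (List Int)) : Decidable (Spec_connectedSubWalks walkIn acnDict out) := by unfold Spec_connectedSubWalks; infer_instance

-- ===== CLAIM (what is proved, stated in full; the proofs are below) =====
def Claim_equal_connectedSubWalks : Prop := ∀ (walkIn : List Int) (acnDict : List (Int × List Int)), Dom_connectedSubWalks walkIn acnDict → Pre_connectedSubWalks walkIn acnDict → Spec_connectedSubWalks walkIn acnDict (connectedSubWalks walkIn acnDict)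

-- ===== LEMMAS AND PROOFS =====

-- appending the k-th element extends a take-slice by one
lemma slice_snoc (walk : List Int) (prev k : Nat) (hpk : prev ≤ k) (hk : k < walk.length) :
    (walk.drop prev).take (k - prev) ++ [walk.getD k 0] = (walk.drop prev).take (k + 1 - prev) := by
  have h1 : k + 1 - prev = (k - prev) + 1 := by omega
  rw [h1, List.take_add_one]
  have h2 : (walk.drop prev)[k - prev]? = some (walk.getD k 0) := by
    rw [List.getElem?_drop]
    have h3 : prev + (k - prev) = k := by omega
    rw [h3, List.getD_eq_getElem?_getD, List.getElem?_eq_getElem hk]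
    rfl
  simp [h2]

-- invariant linking A's (queue, output) state with B's (groups, prev) state over range n
lemma fold_inv (walk : List Int) (P : Nat → Bool) (n : Nat) (hn : n ≤ walk.length) :
    (((List.range n).foldl
        (fun (st : List Int × List (List Int)) pos =>
          if P pos then ([], st.2 ++ [st.1 ++ [walk.getD pos 0]])
          else (st.1 ++ [walk.getD pos 0], st.2))
        (([] : List Int), ([] : List (List Int))))
     = ((walk.drop (((List.range n).filter P).foldl
            (fun (st : List (List Int) × Nat) b =>
              (st.1 ++ [(walk.drop st.2).take (b + 1 - st.2)], b + 1))
            (([] : List (List Int)), 0)).2).take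
          (n - (((List.range n).filter P).foldl
            (fun (st : List (List Int) × Nat) b =>
              (st.1 ++ [(walk.drop st.2).take (b + 1 - st.2)], b + 1))
            (([] : List (List Int)), 0)).2),
        (((List.range n).filter P).foldl
            (fun (st : List (List Int) × Nat) b =>
              (st.1 ++ [(walk.drop st.2).take (b + 1 - st.2)], b + 1))
            (([] : List (List Int)), 0)).1))
    ∧ (((List.range n).filter P).foldl
          (fun (st : List (List Int) × Nat) b =>
            (st.1 ++ [(walk.drop st.2).take (b + 1 - st.2)], b + 1))
          (([] : List (List Int)), 0)).2 ≤ n := by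
  induction n with
  | zero => simp
  | succ n ih =>
    have hn' : n ≤ walk.length := by omega
    obtain ⟨ihA, ihP⟩ := ih hn'
    set B := ((List.range n).filter P).foldl
        (fun (st : List (List Int) × Nat) b =>
          (st.1 ++ [(walk.drop st.2).take (b + 1 - st.2)], b + 1))
        (([] : List (List Int)), 0) with hB
    rw [List.range_succ, List.filter_append, List.foldl_append, List.foldl_append, ← hB]
    by_cases hP : P n
    · have hf : List.filter P [n] = [n] := by simp [hP]
      rw [hf]
      simp only [List.foldl_cons, List.foldl_nil]
      rw [ihA, if_pos hP]
      refine ⟨?_, by omega⟩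
      have hs := slice_snoc walk B.2 n ihP (by omega)
      rw [hs]
      simp
    · have hf : List.filter P [n] = [] := by simp [hP]
      rw [hf]
      simp only [List.foldl_cons, List.foldl_nil]
      rw [ihA, if_neg (by simp [hP])]
      refine ⟨?_, by omega⟩
      have hs := slice_snoc walk B.2 n ihP (by omega)
      rw [hs]

-- ===== VERDICT (by name: the statement is the Claim_ definition above) =====
theorem connectedSubWalks_spec : Claim_equal_connectedSubWalks := by
  intro walkIn acnDict _ _
  unfold Spec_connectedSubWalks connectedSubWalks connectedSubWalks_alt
  have h := fold_inv walkIn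
    (fun i => !((PySem.Dict.mk acnDict).getD (walkIn.getD (i + 1) 0) []).contains (walkIn.getD i 0))
    (walkIn.length - 1) (by omega)
  simp only at h ⊢
  rw [h.1]
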